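-- pv_equiv track=rewrite | github.com/Rhyankwon/algorithms | KaKao/2021 Problems/순위 검색.py | solution
-- ===== SOURCE A (Python) =====
-- import bisect
-- from itertools import combinations
--
-- def solution(info, query):
--     cases = {}
--     nums = []
--     for idx, i in enumerate(info):
--         i = i.split()
--         sentence = i[:-1]
--         for j in range(1, 5):
--             for tmp in combinations(range(4), j):
--                 case = ''
--                 for k in range(4):
--                     if k in tmp:
--                         case += '-'
--                     else :
--                         case += sentence[k]
--                 if case not in cases:
--                     cases[case] = []
--                 cases[case].append(int(i[-1]))
--         if ''.join(sentence) not in cases: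
--             cases[''.join(sentence)] = []
--         cases[''.join(sentence)].append(int(i[-1]))
--     answer = []
--     for value in cases.values():
--         value.sort()
--     for origin_q in query:
--         origin_q = origin_q.split()
--         tmp_q = ''.join([i for i in origin_q[:-1] if i != 'and'])
--         if tmp_q not in cases:
--             answer.append(0)
--         else:
--             cand = cases[tmp_q]
--             b = bisect.bisect_left(cand, int(origin_q[-1]))
--             answer.append(len(cand)-b)
--     return answer
-- ===== SOURCE B (Python) =====
-- def solution(info, query):
--     index = {}
--     for line in info:
--         toks = line.split()
--         attrs = toks[:-1]
--         score = int(toks[-1])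
--         for mask in range(16):
--             if mask == 0:
--                 key = ''.join(attrs)
--             else:
--                 key = ''.join('-' if mask >> k & 1 else attrs[k] for k in range(4))
--             index.setdefault(key, []).append(score)
--     answer = []
--     for q in query:
--         toks = q.split()
--         key = ''.join(t for t in toks[:-1] if t != 'and')
--         answer.append(sum(1 for s in index.get(key, []) if s >= int(toks[-1])))
--     return answer
-- ===== Notes on version B (the rewrite author's own statement) =====
-- stated objective: simpler
-- what changed: Replaces the combinations-based wildcard enumeration plus the separate exact-key pass, the sorting of every bucket and the bisect lookup with a single flat 16-bitmask key enumeration per record and a direct linear count of stored scores >= cutoff per query (no sorting, no bisect, no itertools).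
import Mathlib
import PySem

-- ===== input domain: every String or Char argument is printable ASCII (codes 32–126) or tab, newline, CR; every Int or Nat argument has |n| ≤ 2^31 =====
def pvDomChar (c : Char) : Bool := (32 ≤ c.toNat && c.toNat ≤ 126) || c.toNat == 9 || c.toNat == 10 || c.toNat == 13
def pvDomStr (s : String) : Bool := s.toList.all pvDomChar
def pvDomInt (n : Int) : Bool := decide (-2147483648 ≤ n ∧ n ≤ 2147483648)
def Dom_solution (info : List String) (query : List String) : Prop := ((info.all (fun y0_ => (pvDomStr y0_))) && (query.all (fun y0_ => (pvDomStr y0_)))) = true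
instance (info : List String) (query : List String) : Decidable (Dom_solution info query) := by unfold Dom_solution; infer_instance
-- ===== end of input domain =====

-- B replaces A's combinations-based key enumeration + sort-every-bucket + bisect counting by a flat
-- 16-bitmask key enumeration and a direct linear count of scores >= cutoff (objective: simpler).

-- ===== PORT A =====
def solution (info : List String) (query : List String) : List Int :=
  let cases : PySem.Dict String (List Int) :=
    info.foldl (fun cases line =>
      let i := PySem.Str.split₀ line
      let sentence := PySem.List.slice i none (some (-1))
      let cases := (PySem.List.pyRange 1 5 1).foldl (fun cases j =>
        (PySem.List.combinations (PySem.List.pyRange 0 4 1) j.toNat).foldl (fun cases tmp =>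
          let case := (PySem.List.pyRange 0 4 1).foldl (fun case k =>
            if tmp.contains k then case ++ "-" else case ++ PySem.List.pyGetD sentence k "") ""
          let cases := if cases.contains case then cases else cases.insert case []
          cases.modify case [] (fun v => v ++ [(PySem.Int.ofStr? (PySem.List.pyGetD i (-1) "")).getD 0]))
          cases) cases
      let cases := if cases.contains (PySem.Str.join "" sentence) then cases
                   else cases.insert (PySem.Str.join "" sentence) []
      cases.modify (PySem.Str.join "" sentence) [] (fun v => v ++ [(PySem.Int.ofStr? (PySem.List.pyGetD i (-1) "")).getD 0]))
      PySem.Dict.empty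
  -- 'for value in cases.values(): value.sort()' — in-place sort of every bucket, as a fold over the keys
  let cases := cases.keys.foldl (fun d k => d.modify k [] (fun v => PySem.List.sorted v (fun x => x))) cases
  query.foldl (fun answer origin_q =>
    let oq := PySem.Str.split₀ origin_q
    let tmp_q := PySem.Str.join "" ((PySem.List.slice oq none (some (-1))).filter (fun t => t != "and"))
    if ¬ cases.contains tmp_q then answer ++ [0]
    else
      let cand := cases.getD tmp_q []
      let b := PySem.List.bisectLeft cand ((PySem.Int.ofStr? (PySem.List.pyGetD oq (-1) "")).getD 0)
      answer ++ [PySem.List.len cand - (b : Int)]) []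

-- ===== PORT B =====
def solution_alt (info : List String) (query : List String) : List Int :=
  let index : PySem.Dict String (List Int) :=
    info.foldl (fun index line =>
      let toks := PySem.Str.split₀ line
      let attrs := PySem.List.slice toks none (some (-1))
      let score := (PySem.Int.ofStr? (PySem.List.pyGetD toks (-1) "")).getD 0
      (PySem.List.pyRange 0 16 1).foldl (fun index mask =>
        let key := if mask == 0 then PySem.Str.join "" attrs
          else PySem.Str.join "" ((PySem.List.pyRange 0 4 1).map (fun k =>
            if PySem.Int.band (mask >>> k.toNat) 1 != 0 then "-" else PySem.List.pyGetD attrs k ""))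
        (index.setdefault key []).modify key [] (fun v => v ++ [score])) index) PySem.Dict.empty
  query.foldl (fun answer q =>
    let toks := PySem.Str.split₀ q
    let key := PySem.Str.join "" ((PySem.List.slice toks none (some (-1))).filter (fun t => t != "and"))
    answer ++ [(((index.getD key []).filter (fun s =>
      decide ((PySem.Int.ofStr? (PySem.List.pyGetD toks (-1) "")).getD 0 ≤ s))).map (fun _ => (1:Int))).sum]) []

-- the key a bitmask produces for attribute list s (B's comprehension), the 16 keys of a record,
-- a record's attribute tokens, and a query's lookup key (used by Pre_ and by the proofs)
def keyB (s : List String) (mask : Int) : String :=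
  if mask == 0 then PySem.Str.join "" s
  else PySem.Str.join "" ((PySem.List.pyRange 0 4 1).map (fun k =>
    if PySem.Int.band (mask >>> k.toNat) 1 != 0 then "-" else PySem.List.pyGetD s k ""))
def KB (s : List String) : List String := (PySem.List.pyRange 0 16 1).map (keyB s)
def sL (line : String) : List String := PySem.List.slice (PySem.Str.split₀ line) none (some (-1))
def keyQ (q : String) : String :=
  PySem.Str.join "" ((PySem.List.slice (PySem.Str.split₀ q) none (some (-1))).filter (fun t => t != "and"))

-- ===== PRECONDITION & SPEC =====
-- Pre_ excludes exactly the inputs where the Python A raises: an info line with fewer than five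
-- whitespace tokens (IndexError on sentence[k]) or whose last token is not int-parsable (ValueError),
-- and a query line whose lookup key is one of the sixteen wildcard patterns of some record but whose
-- last token is not int-parsable (ValueError; a query whose key matches no record never parses its cutoff).
def Pre_solution (info : List String) (query : List String) : Prop :=
  (∀ line ∈ info, 5 ≤ (PySem.Str.split₀ line).length ∧
    (PySem.Int.ofStr? ((PySem.List.pyGet? (PySem.Str.split₀ line) (-1)).getD "")).isSome) ∧
  (∀ q ∈ query, (∃ line ∈ info, keyQ q ∈ KB (sL line)) →
    (PySem.Int.ofStr? ((PySem.List.pyGet? (PySem.Str.split₀ q) (-1)).getD "")).isSome)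
instance (info : List String) (query : List String) : Decidable (Pre_solution info query) := by
  unfold Pre_solution; infer_instance
def pvWitness_solution : List String × List String :=
  (["java backend junior pizza 150", "cpp front senior chicken 50"],
   ["java and backend and junior and pizza 100", "- and - and - and chicken 50"])

def Spec_solution (info : List String) (query : List String) (out : List Int) : Prop := out = solution_alt info query
instance (info : List String) (query : List String) (out : List Int) : Decidable (Spec_solution info query out) := by unfold Spec_solution; infer_instance

-- ===== CLAIM (what is proved, stated in full; the proofs are below) =====
def Claim_equal_solution : Prop := ∀ (info : List String) (query : List String), Dom_solution info query → Pre_solution info query → Spec_solution info query (solution info query)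

-- ===== LEMMAS AND PROOFS =====

lemma pyR4 : PySem.List.pyRange 0 4 1 = [0,1,2,3] := rfl
lemma pyR16 : PySem.List.pyRange 0 16 1 = ([0,1,2,3,4,5,6,7,8,9,10,11,12,13,14,15] : List Int) := rfl

lemma join4 (a b c d : String) : PySem.Str.join "" [a,b,c,d] = a ++ b ++ c ++ d := by
  apply String.ext
  simp [PySem.Str.join, PySem.Chars.join_cons_cons, PySem.Chars.join_singleton]

-- the key a combination tmp of wildcard positions produces for attribute list s (A's inner loop)
def keyA (s : List String) (tmp : List Int) : String :=
  (PySem.List.pyRange 0 4 1).foldl (fun case k =>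
    if tmp.contains k then case ++ "-" else case ++ PySem.List.pyGetD s k "") ""
-- 'd[k] = d.get(k, []) + [v]': the single dict step both per-line loops reduce to
def dApp (v : Int) (d : PySem.Dict String (List Int)) (k : String) : PySem.Dict String (List Int) :=
  d.modify k [] (fun l => l ++ [v])
-- the 16 keys one info line contributes, in A's order and in B's order
def KA (s : List String) : List String :=
  (([1,2,3,4] : List Int).flatMap (fun j => PySem.List.combinations ([0,1,2,3] : List Int) j.toNat)).map (keyA s)
    ++ [PySem.Str.join "" s]
-- the attribute tokens and the score of one info line
def vL (line : String) : Int :=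
  (PySem.Int.ofStr? (PySem.List.pyGetD (PySem.Str.split₀ line) (-1) "")).getD 0

lemma keyA_e0 (s : List String) : keyA s ([0] : List Int) = "-" ++ PySem.List.pyGetD s 1 "" ++ PySem.List.pyGetD s 2 "" ++ PySem.List.pyGetD s 3 "" := by
  unfold keyA; rw [pyR4]; norm_num [List.foldl]

lemma keyA_e1 (s : List String) : keyA s ([1] : List Int) = PySem.List.pyGetD s 0 "" ++ "-" ++ PySem.List.pyGetD s 2 "" ++ PySem.List.pyGetD s 3 "" := by
  unfold keyA; rw [pyR4]; norm_num [List.foldl]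

lemma keyA_e2 (s : List String) : keyA s ([2] : List Int) = PySem.List.pyGetD s 0 "" ++ PySem.List.pyGetD s 1 "" ++ "-" ++ PySem.List.pyGetD s 3 "" := by
  unfold keyA; rw [pyR4]; norm_num [List.foldl]

lemma keyA_e3 (s : List String) : keyA s ([3] : List Int) = PySem.List.pyGetD s 0 "" ++ PySem.List.pyGetD s 1 "" ++ PySem.List.pyGetD s 2 "" ++ "-" := by
  unfold keyA; rw [pyR4]; norm_num [List.foldl]

lemma keyA_e4 (s : List String) : keyA s ([0,1] : List Int) = "-" ++ "-" ++ PySem.List.pyGetD s 2 "" ++ PySem.List.pyGetD s 3 "" := by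
  unfold keyA; rw [pyR4]; norm_num [List.foldl]

lemma keyA_e5 (s : List String) : keyA s ([0,2] : List Int) = "-" ++ PySem.List.pyGetD s 1 "" ++ "-" ++ PySem.List.pyGetD s 3 "" := by
  unfold keyA; rw [pyR4]; norm_num [List.foldl]

lemma keyA_e6 (s : List String) : keyA s ([0,3] : List Int) = "-" ++ PySem.List.pyGetD s 1 "" ++ PySem.List.pyGetD s 2 "" ++ "-" := by
  unfold keyA; rw [pyR4]; norm_num [List.foldl]

lemma keyA_e7 (s : List String) : keyA s ([1,2] : List Int) = PySem.List.pyGetD s 0 "" ++ "-" ++ "-" ++ PySem.List.pyGetD s 3 "" := by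
  unfold keyA; rw [pyR4]; norm_num [List.foldl]

lemma keyA_e8 (s : List String) : keyA s ([1,3] : List Int) = PySem.List.pyGetD s 0 "" ++ "-" ++ PySem.List.pyGetD s 2 "" ++ "-" := by
  unfold keyA; rw [pyR4]; norm_num [List.foldl]

lemma keyA_e9 (s : List String) : keyA s ([2,3] : List Int) = PySem.List.pyGetD s 0 "" ++ PySem.List.pyGetD s 1 "" ++ "-" ++ "-" := by
  unfold keyA; rw [pyR4]; norm_num [List.foldl]

lemma keyA_e10 (s : List String) : keyA s ([0,1,2] : List Int) = "-" ++ "-" ++ "-" ++ PySem.List.pyGetD s 3 "" := by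
  unfold keyA; rw [pyR4]; norm_num [List.foldl]

lemma keyA_e11 (s : List String) : keyA s ([0,1,3] : List Int) = "-" ++ "-" ++ PySem.List.pyGetD s 2 "" ++ "-" := by
  unfold keyA; rw [pyR4]; norm_num [List.foldl]

lemma keyA_e12 (s : List String) : keyA s ([0,2,3] : List Int) = "-" ++ PySem.List.pyGetD s 1 "" ++ "-" ++ "-" := by
  unfold keyA; rw [pyR4]; norm_num [List.foldl]

lemma keyA_e13 (s : List String) : keyA s ([1,2,3] : List Int) = PySem.List.pyGetD s 0 "" ++ "-" ++ "-" ++ "-" := by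
  unfold keyA; rw [pyR4]; norm_num [List.foldl]

lemma keyA_e14 (s : List String) : keyA s ([0,1,2,3] : List Int) = "-" ++ "-" ++ "-" ++ "-" := by
  unfold keyA; rw [pyR4]; norm_num [List.foldl]

lemma keyB_e1 (s : List String) : keyB s 1 = "-" ++ PySem.List.pyGetD s 1 "" ++ PySem.List.pyGetD s 2 "" ++ PySem.List.pyGetD s 3 "" := by
  unfold keyB
  rw [if_neg (by decide), pyR4, List.map_cons, List.map_cons, List.map_cons, List.map_cons,
    List.map_nil, if_pos (by decide), if_neg (by decide), if_neg (by decide), if_neg (by decide), join4]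

lemma keyB_e2 (s : List String) : keyB s 2 = PySem.List.pyGetD s 0 "" ++ "-" ++ PySem.List.pyGetD s 2 "" ++ PySem.List.pyGetD s 3 "" := by
  unfold keyB
  rw [if_neg (by decide), pyR4, List.map_cons, List.map_cons, List.map_cons, List.map_cons,
    List.map_nil, if_neg (by decide), if_pos (by decide), if_neg (by decide), if_neg (by decide), join4]

lemma keyB_e3 (s : List String) : keyB s 3 = "-" ++ "-" ++ PySem.List.pyGetD s 2 "" ++ PySem.List.pyGetD s 3 "" := by
  unfold keyB
  rw [if_neg (by decide), pyR4, List.map_cons, List.map_cons, List.map_cons, List.map_cons,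
    List.map_nil, if_pos (by decide), if_pos (by decide), if_neg (by decide), if_neg (by decide), join4]

lemma keyB_e4 (s : List String) : keyB s 4 = PySem.List.pyGetD s 0 "" ++ PySem.List.pyGetD s 1 "" ++ "-" ++ PySem.List.pyGetD s 3 "" := by
  unfold keyB
  rw [if_neg (by decide), pyR4, List.map_cons, List.map_cons, List.map_cons, List.map_cons,
    List.map_nil, if_neg (by decide), if_neg (by decide), if_pos (by decide), if_neg (by decide), join4]

lemma keyB_e5 (s : List String) : keyB s 5 = "-" ++ PySem.List.pyGetD s 1 "" ++ "-" ++ PySem.List.pyGetD s 3 "" := by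
  unfold keyB
  rw [if_neg (by decide), pyR4, List.map_cons, List.map_cons, List.map_cons, List.map_cons,
    List.map_nil, if_pos (by decide), if_neg (by decide), if_pos (by decide), if_neg (by decide), join4]

lemma keyB_e6 (s : List String) : keyB s 6 = PySem.List.pyGetD s 0 "" ++ "-" ++ "-" ++ PySem.List.pyGetD s 3 "" := by
  unfold keyB
  rw [if_neg (by decide), pyR4, List.map_cons, List.map_cons, List.map_cons, List.map_cons,
    List.map_nil, if_neg (by decide), if_pos (by decide), if_pos (by decide), if_neg (by decide), join4]

lemma keyB_e7 (s : List String) : keyB s 7 = "-" ++ "-" ++ "-" ++ PySem.List.pyGetD s 3 "" := by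
  unfold keyB
  rw [if_neg (by decide), pyR4, List.map_cons, List.map_cons, List.map_cons, List.map_cons,
    List.map_nil, if_pos (by decide), if_pos (by decide), if_pos (by decide), if_neg (by decide), join4]

lemma keyB_e8 (s : List String) : keyB s 8 = PySem.List.pyGetD s 0 "" ++ PySem.List.pyGetD s 1 "" ++ PySem.List.pyGetD s 2 "" ++ "-" := by
  unfold keyB
  rw [if_neg (by decide), pyR4, List.map_cons, List.map_cons, List.map_cons, List.map_cons,
    List.map_nil, if_neg (by decide), if_neg (by decide), if_neg (by decide), if_pos (by decide), join4]

lemma keyB_e9 (s : List String) : keyB s 9 = "-" ++ PySem.List.pyGetD s 1 "" ++ PySem.List.pyGetD s 2 "" ++ "-" := by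
  unfold keyB
  rw [if_neg (by decide), pyR4, List.map_cons, List.map_cons, List.map_cons, List.map_cons,
    List.map_nil, if_pos (by decide), if_neg (by decide), if_neg (by decide), if_pos (by decide), join4]

lemma keyB_e10 (s : List String) : keyB s 10 = PySem.List.pyGetD s 0 "" ++ "-" ++ PySem.List.pyGetD s 2 "" ++ "-" := by
  unfold keyB
  rw [if_neg (by decide), pyR4, List.map_cons, List.map_cons, List.map_cons, List.map_cons,
    List.map_nil, if_neg (by decide), if_pos (by decide), if_neg (by decide), if_pos (by decide), join4]

lemma keyB_e11 (s : List String) : keyB s 11 = "-" ++ "-" ++ PySem.List.pyGetD s 2 "" ++ "-" := by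
  unfold keyB
  rw [if_neg (by decide), pyR4, List.map_cons, List.map_cons, List.map_cons, List.map_cons,
    List.map_nil, if_pos (by decide), if_pos (by decide), if_neg (by decide), if_pos (by decide), join4]

lemma keyB_e12 (s : List String) : keyB s 12 = PySem.List.pyGetD s 0 "" ++ PySem.List.pyGetD s 1 "" ++ "-" ++ "-" := by
  unfold keyB
  rw [if_neg (by decide), pyR4, List.map_cons, List.map_cons, List.map_cons, List.map_cons,
    List.map_nil, if_neg (by decide), if_neg (by decide), if_pos (by decide), if_pos (by decide), join4]

lemma keyB_e13 (s : List String) : keyB s 13 = "-" ++ PySem.List.pyGetD s 1 "" ++ "-" ++ "-" := by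
  unfold keyB
  rw [if_neg (by decide), pyR4, List.map_cons, List.map_cons, List.map_cons, List.map_cons,
    List.map_nil, if_pos (by decide), if_neg (by decide), if_pos (by decide), if_pos (by decide), join4]

lemma keyB_e14 (s : List String) : keyB s 14 = PySem.List.pyGetD s 0 "" ++ "-" ++ "-" ++ "-" := by
  unfold keyB
  rw [if_neg (by decide), pyR4, List.map_cons, List.map_cons, List.map_cons, List.map_cons,
    List.map_nil, if_neg (by decide), if_pos (by decide), if_pos (by decide), if_pos (by decide), join4]

lemma keyB_e15 (s : List String) : keyB s 15 = "-" ++ "-" ++ "-" ++ "-" := by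
  unfold keyB
  rw [if_neg (by decide), pyR4, List.map_cons, List.map_cons, List.map_cons, List.map_cons,
    List.map_nil, if_pos (by decide), if_pos (by decide), if_pos (by decide), if_pos (by decide), join4]

lemma keyB_e0 (s : List String) : keyB s 0 = PySem.Str.join "" s := by
  unfold keyB; rw [if_pos (by decide)]

lemma flatA : (([1,2,3,4] : List Int).flatMap (fun j => PySem.List.combinations ([0,1,2,3] : List Int) j.toNat))
  = [[0],[1],[2],[3],[0,1],[0,2],[0,3],[1,2],[1,3],[2,3],[0,1,2],[0,1,3],[0,2,3],[1,2,3],[0,1,2,3]] := rfl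

-- the multiset of keys one line contributes is the same in A and in B
lemma count_KA_KB (s : List String) (q : String) : (KA s).count q = (KB s).count q := by
  simp only [KA, KB, flatA, pyR16, List.map_cons, List.map_nil, keyA_e0, keyA_e1, keyA_e2, keyA_e3, keyA_e4, keyA_e5, keyA_e6, keyA_e7, keyA_e8, keyA_e9, keyA_e10, keyA_e11, keyA_e12, keyA_e13, keyA_e14, keyB_e0, keyB_e1, keyB_e2, keyB_e3, keyB_e4, keyB_e5, keyB_e6, keyB_e7, keyB_e8, keyB_e9, keyB_e10, keyB_e11, keyB_e12, keyB_e13, keyB_e14, keyB_e15,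
    List.count_cons, List.count_nil, List.cons_append, List.nil_append]
  omega

lemma mem_KA_KB (s : List String) (q : String) : q ∈ KA s ↔ q ∈ KB s := by
  rw [← List.count_pos_iff, ← List.count_pos_iff, count_KA_KB]

lemma step_eq (d : PySem.Dict String (List Int)) (k : String) (v : Int) :
    ((if d.contains k then d else d.insert k []).modify k [] (fun l => l ++ [v])) = dApp v d k := by
  unfold dApp
  by_cases h : d.contains k
  · simp [h]
  · simp [h, PySem.Dict.modify, PySem.Dict.insert_insert_self, PySem.Dict.getD_insert_self,
      PySem.Dict.getD_of_not_contains]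

lemma step_eq' (d : PySem.Dict String (List Int)) (k : String) (v : Int) :
    ((d.setdefault k []).modify k [] (fun l => l ++ [v])) = dApp v d k := by
  unfold dApp
  by_cases h : d.contains k
  · rw [PySem.Dict.setdefault_of_contains _ _ h]
  · rw [PySem.Dict.setdefault_of_not_contains _ _ (by simpa using h)]
    simp [h, PySem.Dict.modify, PySem.Dict.insert_insert_self, PySem.Dict.getD_insert_self,
      PySem.Dict.getD_of_not_contains]

lemma foldl_flatMap_app (v : Int) {α : Type} (js : List α) (g : α → List String) :
    ∀ d : PySem.Dict String (List Int),
      js.foldl (fun d j => (g j).foldl (dApp v) d) d = (js.flatMap g).foldl (dApp v) d := by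
  induction js with
  | nil => intro d; simp
  | cons j js ih => intro d; simp [List.foldl_append, ih]

lemma foldApp_getD (v : Int) (ks : List String) :
    ∀ (d : PySem.Dict String (List Int)) (q : String),
      (ks.foldl (dApp v) d).getD q [] = d.getD q [] ++ List.replicate (ks.count q) v := by
  induction ks with
  | nil => intro d q; simp
  | cons k ks ih =>
    intro d q
    rw [List.foldl_cons, ih, List.count_cons]
    by_cases h : q = k
    · subst h
      simp [dApp, PySem.Dict.getD_modify_self]
      rw [← List.replicate_succ, List.replicate_succ']
    · have hbne : (k == q) = false := by simpa using Ne.symm h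
      simp [dApp, PySem.Dict.getD_modify_of_ne _ _ _ h, hbne]

lemma modFold_contains (f : List Int → List Int) (ks : List String) :
    ∀ (d : PySem.Dict String (List Int)) (q : String),
      ((ks.foldl (fun d k => d.modify k [] f) d).contains q) = (d.contains q || ks.contains q) := by
  induction ks with
  | nil => intro d q; simp
  | cons k ks ih =>
    intro d q
    rw [List.foldl_cons, ih, PySem.Dict.contains_modify]
    by_cases h : q = k
    · subst h; simp [Bool.or_comm]
    · have h' : ¬ (k = q) := fun hh => h hh.symm
      simp [h, Bool.or_assoc]

lemma foldApp_contains (v : Int) (ks : List String) (d : PySem.Dict String (List Int)) (q : String) :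
    ((ks.foldl (dApp v) d).contains q) = (d.contains q || ks.contains q) :=
  modFold_contains (fun l => l ++ [v]) ks d q

lemma lineA_eq (d : PySem.Dict String (List Int)) (line : String) :
    (let i := PySem.Str.split₀ line
     let sentence := PySem.List.slice i none (some (-1))
     let cases := (PySem.List.pyRange 1 5 1).foldl (fun cases j =>
        (PySem.List.combinations (PySem.List.pyRange 0 4 1) j.toNat).foldl (fun cases tmp =>
          let case := (PySem.List.pyRange 0 4 1).foldl (fun case k =>
            if tmp.contains k then case ++ "-" else case ++ PySem.List.pyGetD sentence k "") ""
          let cases := if cases.contains case then cases else cases.insert case []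
          cases.modify case [] (fun v => v ++ [(PySem.Int.ofStr? (PySem.List.pyGetD i (-1) "")).getD 0]))
          cases) d
     let cases := if cases.contains (PySem.Str.join "" sentence) then cases
                   else cases.insert (PySem.Str.join "" sentence) []
     cases.modify (PySem.Str.join "" sentence) [] (fun v => v ++ [(PySem.Int.ofStr? (PySem.List.pyGetD i (-1) "")).getD 0]))
    = (KA (sL line)).foldl (dApp (vL line)) d := by
  show (((PySem.List.pyRange 1 5 1).foldl (fun cases j =>
        (PySem.List.combinations (PySem.List.pyRange 0 4 1) j.toNat).foldl (fun cases tmp =>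
          (if cases.contains (keyA (sL line) tmp) then cases else cases.insert (keyA (sL line) tmp) []).modify
            (keyA (sL line) tmp) [] (fun v => v ++ [vL line])) cases) d) |> fun cases =>
      (if cases.contains (PySem.Str.join "" (sL line)) then cases
       else cases.insert (PySem.Str.join "" (sL line)) []).modify (PySem.Str.join "" (sL line)) []
        (fun v => v ++ [vL line]))
    = (KA (sL line)).foldl (dApp (vL line)) d
  simp only [step_eq]
  rw [KA]
  conv_rhs => rw [List.foldl_append, List.foldl_cons, List.foldl_nil, List.map_flatMap,
    ← foldl_flatMap_app]
  simp only [List.foldl_map]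
  rfl

lemma lineB_eq (d : PySem.Dict String (List Int)) (line : String) :
    (let toks := PySem.Str.split₀ line
     let attrs := PySem.List.slice toks none (some (-1))
     let score := (PySem.Int.ofStr? (PySem.List.pyGetD toks (-1) "")).getD 0
     (PySem.List.pyRange 0 16 1).foldl (fun index mask =>
        let key := if mask == 0 then PySem.Str.join "" attrs
          else PySem.Str.join "" ((PySem.List.pyRange 0 4 1).map (fun k =>
            if PySem.Int.band (mask >>> k.toNat) 1 != 0 then "-" else PySem.List.pyGetD attrs k ""))
        (index.setdefault key []).modify key [] (fun v => v ++ [score])) d)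
    = (KB (sL line)).foldl (dApp (vL line)) d := by
  show ((PySem.List.pyRange 0 16 1).foldl (fun index mask =>
      (index.setdefault (keyB (sL line) mask) []).modify (keyB (sL line) mask) []
        (fun v => v ++ [vL line])) d)
    = (KB (sL line)).foldl (dApp (vL line)) d
  simp only [step_eq']
  rw [KB]
  simp only [List.foldl_map]

-- the two index-building loops agree on every lookup and on every membership test
lemma dicts_inv (info : List String) :
    ∀ (d1 d2 : PySem.Dict String (List Int)),
      (∀ q, d1.getD q [] = d2.getD q []) → (∀ q, d1.contains q = d2.contains q) →
      (∀ q, (info.foldl (fun cases line =>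
          let i := PySem.Str.split₀ line
          let sentence := PySem.List.slice i none (some (-1))
          let cases := (PySem.List.pyRange 1 5 1).foldl (fun cases j =>
            (PySem.List.combinations (PySem.List.pyRange 0 4 1) j.toNat).foldl (fun cases tmp =>
              let case := (PySem.List.pyRange 0 4 1).foldl (fun case k =>
                if tmp.contains k then case ++ "-" else case ++ PySem.List.pyGetD sentence k "") ""
              let cases := if cases.contains case then cases else cases.insert case []
              cases.modify case [] (fun v => v ++ [(PySem.Int.ofStr? (PySem.List.pyGetD i (-1) "")).getD 0]))
              cases) cases
          let cases := if cases.contains (PySem.Str.join "" sentence) then cases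
                       else cases.insert (PySem.Str.join "" sentence) []
          cases.modify (PySem.Str.join "" sentence) [] (fun v => v ++ [(PySem.Int.ofStr? (PySem.List.pyGetD i (-1) "")).getD 0]))
          d1).getD q []
        = (info.foldl (fun index line =>
          let toks := PySem.Str.split₀ line
          let attrs := PySem.List.slice toks none (some (-1))
          let score := (PySem.Int.ofStr? (PySem.List.pyGetD toks (-1) "")).getD 0
          (PySem.List.pyRange 0 16 1).foldl (fun index mask =>
            let key := if mask == 0 then PySem.Str.join "" attrs
              else PySem.Str.join "" ((PySem.List.pyRange 0 4 1).map (fun k =>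
                if PySem.Int.band (mask >>> k.toNat) 1 != 0 then "-" else PySem.List.pyGetD attrs k ""))
            (index.setdefault key []).modify key [] (fun v => v ++ [score])) index)
          d2).getD q [])
      ∧ (∀ q, (info.foldl (fun cases line =>
          let i := PySem.Str.split₀ line
          let sentence := PySem.List.slice i none (some (-1))
          let cases := (PySem.List.pyRange 1 5 1).foldl (fun cases j =>
            (PySem.List.combinations (PySem.List.pyRange 0 4 1) j.toNat).foldl (fun cases tmp =>
              let case := (PySem.List.pyRange 0 4 1).foldl (fun case k =>
                if tmp.contains k then case ++ "-" else case ++ PySem.List.pyGetD sentence k "") ""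
              let cases := if cases.contains case then cases else cases.insert case []
              cases.modify case [] (fun v => v ++ [(PySem.Int.ofStr? (PySem.List.pyGetD i (-1) "")).getD 0]))
              cases) cases
          let cases := if cases.contains (PySem.Str.join "" sentence) then cases
                       else cases.insert (PySem.Str.join "" sentence) []
          cases.modify (PySem.Str.join "" sentence) [] (fun v => v ++ [(PySem.Int.ofStr? (PySem.List.pyGetD i (-1) "")).getD 0]))
          d1).contains q
        = (info.foldl (fun index line =>
          let toks := PySem.Str.split₀ line
          let attrs := PySem.List.slice toks none (some (-1))
          let score := (PySem.Int.ofStr? (PySem.List.pyGetD toks (-1) "")).getD 0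
          (PySem.List.pyRange 0 16 1).foldl (fun index mask =>
            let key := if mask == 0 then PySem.Str.join "" attrs
              else PySem.Str.join "" ((PySem.List.pyRange 0 4 1).map (fun k =>
                if PySem.Int.band (mask >>> k.toNat) 1 != 0 then "-" else PySem.List.pyGetD attrs k ""))
            (index.setdefault key []).modify key [] (fun v => v ++ [score])) index)
          d2).contains q) := by
  induction info with
  | nil => intro d1 d2 hg hc; exact ⟨hg, hc⟩
  | cons line info ih =>
    intro d1 d2 hg hc
    rw [List.foldl_cons, List.foldl_cons]
    apply ih
    · intro q
      rw [lineA_eq d1 line, lineB_eq d2 line, foldApp_getD, foldApp_getD, hg q, count_KA_KB]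
    · intro q
      rw [lineA_eq d1 line, lineB_eq d2 line, foldApp_contains, foldApp_contains, hc q]
      have : (KA (sL line)).contains q = (KB (sL line)).contains q := by
        have hiff := mem_KA_KB (sL line) q
        by_cases h : q ∈ KA (sL line)
        · have h2 := hiff.mp h
          simp [h, h2]
        · have h2 : q ∉ KB (sL line) := fun hb => h (hiff.mpr hb)
          simp [h, h2]
      rw [this]

-- A's in-place bucket sort: lookups become sorted lookups, membership is unchanged
lemma sortFold_getD (ks : List String) :
    ∀ (d : PySem.Dict String (List Int)) (q : String),
      ((ks.foldl (fun d k => d.modify k [] (fun v => PySem.List.sorted v (fun x => x))) d).getD q [])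
        = if q ∈ ks then PySem.List.sorted (d.getD q []) (fun x => x) else d.getD q [] := by
  induction ks with
  | nil => intro d q; simp
  | cons k ks ih =>
    intro d q
    rw [List.foldl_cons, ih]
    by_cases h : q = k
    · subst h
      by_cases hm : q ∈ ks
      · simp [hm, PySem.Dict.getD_modify_self, PySem.List.sorted_sorted]
      · simp [hm, PySem.Dict.getD_modify_self]
    · by_cases hm : q ∈ ks
      · simp [hm, h, PySem.Dict.getD_modify_of_ne _ _ _ h]
      · simp [hm, h, PySem.Dict.getD_modify_of_ne _ _ _ h]

-- counting the tail of a sorted bucket with bisect = filtering the raw bucket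
lemma sum_ones (xs : List Int) : (xs.map (fun _ => (1:Int))).sum = xs.length := by
  induction xs with
  | nil => simp
  | cons x xs ih => simp; omega

lemma count_ge (l : List Int) (c : Int) :
    (PySem.List.len (PySem.List.sorted l (fun x => x)) : Int)
      - (PySem.List.bisectLeft (PySem.List.sorted l (fun x => x)) c : Int)
    = ((l.filter (fun s => decide (c ≤ s))).map (fun _ => (1:Int))).sum := by
  have hpw : (PySem.List.sorted l (fun x => x)).Pairwise (fun a b => a ≤ b) :=
    PySem.List.sorted_pairwise l (fun x => x)
  obtain ⟨hble, hlt, hge⟩ := PySem.List.bisectLeft_spec (PySem.List.sorted l (fun x => x)) c hpw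
  set m := PySem.List.sorted l (fun x => x) with hm
  set b := PySem.List.bisectLeft m c with hb
  have hcount : m.countP (fun s => decide (c ≤ s)) = m.length - b := by
    conv_lhs => rw [← List.take_append_drop b m]
    rw [List.countP_append]
    have h1 : (m.take b).countP (fun s => decide (c ≤ s)) = 0 := by
      apply List.countP_eq_zero.mpr
      intro x hx
      obtain ⟨i, hi, hxi⟩ := List.mem_iff_getElem.mp hx
      have hib : i < b := lt_of_lt_of_le hi (by simp)
      have him : i < m.length := lt_of_lt_of_le hi (by simp [List.length_take])
      have := hlt i him hib
      simp only [List.getElem_take] at hxi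
      subst hxi
      simpa using not_le.mpr this
    have h2 : (m.drop b).countP (fun s => decide (c ≤ s)) = (m.drop b).length := by
      apply List.countP_eq_length.mpr
      intro x hx
      obtain ⟨i, hi, hxi⟩ := List.mem_iff_getElem.mp hx
      have him : b + i < m.length := by
        have := hi; simp [List.length_drop] at this; omega
      have := hge (b + i) him (Nat.le_add_right _ _)
      simp only [List.getElem_drop] at hxi
      subst hxi
      simpa using this
    rw [h1, h2, List.length_drop]
    omega
  have hperm : m.Perm l := PySem.List.sorted_perm l (fun x => x) false
  have hfilter : (l.filter (fun s => decide (c ≤ s))).length = l.countP (fun s => decide (c ≤ s)) :=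
    (List.countP_eq_length_filter).symm
  have hcp : l.countP (fun s => decide (c ≤ s)) = m.countP (fun s => decide (c ≤ s)) :=
    (hperm.countP_eq _).symm
  rw [sum_ones, hfilter, hcp, hcount, PySem.List.len_eq]
  have : b ≤ m.length := hble
  omega

-- the two dictionaries, and A's sorted dictionary
def dictA (info : List String) : PySem.Dict String (List Int) :=
  info.foldl (fun cases line =>
    let i := PySem.Str.split₀ line
    let sentence := PySem.List.slice i none (some (-1))
    let cases := (PySem.List.pyRange 1 5 1).foldl (fun cases j =>
      (PySem.List.combinations (PySem.List.pyRange 0 4 1) j.toNat).foldl (fun cases tmp =>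
        let case := (PySem.List.pyRange 0 4 1).foldl (fun case k =>
          if tmp.contains k then case ++ "-" else case ++ PySem.List.pyGetD sentence k "") ""
        let cases := if cases.contains case then cases else cases.insert case []
        cases.modify case [] (fun v => v ++ [(PySem.Int.ofStr? (PySem.List.pyGetD i (-1) "")).getD 0]))
        cases) cases
    let cases := if cases.contains (PySem.Str.join "" sentence) then cases
                 else cases.insert (PySem.Str.join "" sentence) []
    cases.modify (PySem.Str.join "" sentence) [] (fun v => v ++ [(PySem.Int.ofStr? (PySem.List.pyGetD i (-1) "")).getD 0]))
    PySem.Dict.empty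
def dictS (info : List String) : PySem.Dict String (List Int) :=
  (dictA info).keys.foldl (fun d k => d.modify k [] (fun v => PySem.List.sorted v (fun x => x))) (dictA info)
def dictB (info : List String) : PySem.Dict String (List Int) :=
  info.foldl (fun index line =>
    let toks := PySem.Str.split₀ line
    let attrs := PySem.List.slice toks none (some (-1))
    let score := (PySem.Int.ofStr? (PySem.List.pyGetD toks (-1) "")).getD 0
    (PySem.List.pyRange 0 16 1).foldl (fun index mask =>
      let key := if mask == 0 then PySem.Str.join "" attrs
        else PySem.Str.join "" ((PySem.List.pyRange 0 4 1).map (fun k =>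
          if PySem.Int.band (mask >>> k.toNat) 1 != 0 then "-" else PySem.List.pyGetD attrs k ""))
      (index.setdefault key []).modify key [] (fun v => v ++ [score])) index) PySem.Dict.empty
def cQ (q : String) : Int := (PySem.Int.ofStr? (PySem.List.pyGetD (PySem.Str.split₀ q) (-1) "")).getD 0

lemma dictAB_getD (info : List String) (q : String) :
    (dictA info).getD q [] = (dictB info).getD q [] :=
  (dicts_inv info PySem.Dict.empty PySem.Dict.empty (fun _ => rfl) (fun _ => rfl)).1 q
lemma dictAB_contains (info : List String) (q : String) :
    (dictA info).contains q = (dictB info).contains q :=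
  (dicts_inv info PySem.Dict.empty PySem.Dict.empty (fun _ => rfl) (fun _ => rfl)).2 q

lemma solution_eq (info query : List String) :
    solution info query = query.foldl (fun answer origin_q =>
      if ¬ (dictS info).contains (keyQ origin_q) then answer ++ [0]
      else answer ++ [(PySem.List.len ((dictS info).getD (keyQ origin_q) []) : Int)
        - (PySem.List.bisectLeft ((dictS info).getD (keyQ origin_q) []) (cQ origin_q) : Int)]) [] := rfl

lemma solution_alt_eq (info query : List String) :
    solution_alt info query = query.foldl (fun answer q =>
      answer ++ [((((dictB info).getD (keyQ q) []).filter (fun s => decide (cQ q ≤ s))).map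
        (fun _ => (1:Int))).sum]) [] := rfl

lemma dictS_contains (info : List String) (q : String) :
    (dictS info).contains q = (dictA info).contains q := by
  unfold dictS
  rw [modFold_contains]
  by_cases hmem : q ∈ (dictA info).keys
  · simp [hmem, (PySem.Dict.contains_iff_mem_keys _ _).mpr hmem]
  · have hA : (dictA info).contains q = false := by
      rcases Bool.eq_false_or_eq_true ((dictA info).contains q) with h | h
      · exact absurd ((PySem.Dict.contains_iff_mem_keys _ _).mp h) hmem
      · exact h
    simp [hmem, hA]

-- ===== VERDICT (by name: the statement is the Claim_ definition above) =====
theorem solution_spec : Claim_equal_solution := by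
  intro info query _hdom _hpre
  unfold Spec_solution
  rw [solution_eq, solution_alt_eq]
  apply PySem.List.foldl_congr_mem
  intro acc x _hx
  by_cases hB : (dictB info).contains (keyQ x) = true
  · have hA : (dictA info).contains (keyQ x) = true := (dictAB_contains info _).trans hB
    have hmem : keyQ x ∈ (dictA info).keys := (PySem.Dict.contains_iff_mem_keys _ _).mp hA
    rw [if_neg (by simp [dictS_contains, hA])]
    have hS : (dictS info).getD (keyQ x) []
        = PySem.List.sorted ((dictB info).getD (keyQ x) []) (fun y => y) := by
      unfold dictS
      rw [sortFold_getD, if_pos hmem, dictAB_getD]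
    rw [hS]
    rw [count_ge]
  · have hA : (dictA info).contains (keyQ x) = false := by
      rw [dictAB_contains]; simpa using hB
    have hBf : (dictB info).contains (keyQ x) = false := by simpa using hB
    rw [if_pos (by simp [dictS_contains, hA])]
    rw [PySem.Dict.getD_of_not_contains _ _ hBf]
    simp
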